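-- pv_equiv track=rewrite | github.com/hailuan/urlquote | __init__.py | paramurl_split
-- ===== SOURCE A (Python) =====
-- def split_without_remove_prefix(url, sep):
--     """Same as split_without_remove but the key of separator
--     will be located as prefix of element in list.
--
--     >>> split_without_remove_prefix('&a=b/', '=')
--     ['&a', '=b/']
--     """
--     splited_url = url.split(sep)
--     if len(splited_url) > 1:
--         splited_url = [splited_url[0]] + [sep + e for e in splited_url[1:]]
--         if splited_url[0] == "":
--             del splited_url[0]
--     return splited_url
--
-- def paramurl_split(part_of_url):
--     """Separate all parameter in url and their values.
--
--     >>> paramurl_split('file#fragment?param=value&param2=value')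
--     ['file', '#fragment', '?param', '=value', '&param2', '=value']
--     """
--     list_param_url = [part_of_url]
--     keys_special = ['?', '&', '=', '#']
--     for key in keys_special:
--         temp_list = []
--         for elt in list_param_url:
--             temp_list += split_without_remove_prefix(elt, key)
--         list_param_url = temp_list[:]
--     return list_param_url
-- ===== SOURCE B (Python) =====
-- def paramurl_split(part_of_url):
--     """Separate all parameter in url and their values.
--
--     Single left-to-right scan instead of four repeated split passes.
--     """
--     res = []
--     cur = ''
--     for c in part_of_url:
--         if c in '?&=#':
--             res.append(cur)
--             cur = c
--         else:
--             cur += c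
--     res.append(cur)
--     if len(res) > 1 and res[0] == '':
--         del res[0]
--     return res
-- ===== Notes on version B (the rewrite author's own statement) =====
-- stated objective: simpler
-- what changed: Replaces four sequential split-and-rebuild passes (one per special character, each re-splitting every token and re-attaching the separator as a prefix) with one linear scan that starts a new token before each of the four URL special characters and drops a leading empty token once at the end.
import Mathlib
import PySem

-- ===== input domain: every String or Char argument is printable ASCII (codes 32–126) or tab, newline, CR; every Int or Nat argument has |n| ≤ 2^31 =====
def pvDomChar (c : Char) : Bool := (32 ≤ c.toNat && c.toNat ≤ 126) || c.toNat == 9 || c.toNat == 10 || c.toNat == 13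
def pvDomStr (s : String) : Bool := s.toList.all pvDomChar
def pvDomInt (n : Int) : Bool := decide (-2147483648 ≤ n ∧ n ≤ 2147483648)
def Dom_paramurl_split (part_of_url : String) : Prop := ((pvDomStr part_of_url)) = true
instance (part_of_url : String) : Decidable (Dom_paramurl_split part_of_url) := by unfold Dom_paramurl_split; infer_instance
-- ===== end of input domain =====

-- B replaces A's four split-and-rebuild passes by one linear scan (objective: simpler).

-- ===== PORT A =====
-- split_without_remove_prefix, at List Char level (url.split(sep) → PySem.Chars.splitOn, exact)
def pvSwrp (url sep : List Char) : List (List Char) :=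
  let splited := PySem.Chars.splitOn url sep
  if splited.length > 1 then
    let s2 := splited.take 1 ++ (splited.drop 1).map (fun e => sep ++ e)
    if s2.headI = [] then s2.tail else s2
  else splited

def paramurl_split (part_of_url : String) : List String :=
  let list0 : List (List Char) := [part_of_url.toList]
  let keys : List Char := ['?', '&', '=', '#']
  let final := keys.foldl
    (fun list_param key => list_param.foldl (fun temp elt => temp ++ pvSwrp elt [key]) []) list0
  final.map String.ofList

-- ===== PORT B =====
def pvScanStep (ks : List Char) (st : List (List Char) × List Char) (c : Char) :
    List (List Char) × List Char :=
  if c ∈ ks then (st.1 ++ [st.2], [c]) else (st.1, st.2 ++ [c])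

def paramurl_split_alt (part_of_url : String) : List String :=
  let st := part_of_url.toList.foldl (pvScanStep ['?', '&', '=', '#']) ([], [])
  let toks := st.1 ++ [st.2]
  let toks' := if 1 < toks.length ∧ toks.headI = [] then toks.tail else toks
  toks'.map String.ofList

-- ===== PRECONDITION & SPEC =====
def Spec_paramurl_split (part_of_url : String) (out : List String) : Prop := out = paramurl_split_alt part_of_url
instance (part_of_url : String) (out : List String) : Decidable (Spec_paramurl_split part_of_url out) := by unfold Spec_paramurl_split; infer_instance

-- ===== CLAIM (what is proved, stated in full; the proofs are below) =====
def Claim_equal_paramurl_split : Prop := ∀ (part_of_url : String), Dom_paramurl_split part_of_url → Spec_paramurl_split part_of_url (paramurl_split part_of_url)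

-- ===== LEMMAS AND PROOFS =====

-- tokens of l split at k, separator removed (Python str.split semantics)
def pvSplitC (k : Char) : List Char → List (List Char)
  | [] => [[]]
  | c :: rest =>
      let r := pvSplitC k rest
      if c = k then [] :: r else (c :: r.headI) :: r.tail

-- tokens of l cut before every char of ks, that char kept as prefix of its token
def pvRaw (ks : List Char) : List Char → List (List Char)
  | [] => [[]]
  | c :: rest =>
      let r := pvRaw ks rest
      if c ∈ ks then [] :: (c :: r.headI) :: r.tail else (c :: r.headI) :: r.tail

-- drop a leading empty token when at least two tokens exist
def pvDrop : List (List Char) → List (List Char)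
  | [] :: t :: ts => t :: ts
  | x => x

theorem pvSplitC_ne_nil (k : Char) (l : List Char) : pvSplitC k l ≠ [] := by
  cases l <;> simp [pvSplitC] <;> split <;> simp

theorem pvRaw_ne_nil (ks : List Char) (l : List Char) : pvRaw ks l ≠ [] := by
  cases l <;> simp [pvRaw] <;> split <;> simp

theorem pvDrop_nil_cons (t : List Char) (ts : List (List Char)) :
    pvDrop ([] :: t :: ts) = t :: ts := rfl

theorem pvDrop_cons_cons (c : Char) (cs : List Char) (ts : List (List Char)) :
    pvDrop ((c :: cs) :: ts) = (c :: cs) :: ts := by cases ts <;> rfl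

theorem pvGo_spec (k : Char) (l : List Char) : ∀ (fuel : Nat) (cur : List Char)
    (acc : List (List Char)), l.length ≤ fuel →
    PySem.Chars.splitOn.go [k] fuel l cur acc =
      acc.reverse ++ (cur.reverse ++ (pvSplitC k l).headI) :: (pvSplitC k l).tail := by
  induction l with
  | nil =>
      intro fuel cur acc _
      cases fuel <;> simp [PySem.Chars.splitOn.go, pvSplitC]
  | cons c rest ih =>
      intro fuel cur acc hf
      cases fuel with
      | zero => simp at hf
      | succ f =>
        have hrest : rest.length ≤ f := by simpa using hf
        by_cases hc : c = k
        · subst hc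
          have hpre : List.isPrefixOf [c] (c :: rest) = true := by
            simp [List.isPrefixOf]
          rw [show PySem.Chars.splitOn.go [c] (f+1) (c :: rest) cur acc =
              PySem.Chars.splitOn.go [c] f (List.drop 1 (c :: rest)) [] (cur.reverse :: acc) by
            simp [PySem.Chars.splitOn.go, hpre]]
          rw [List.drop_one, List.tail_cons, ih f [] (cur.reverse :: acc) hrest]
          obtain ⟨t, ts, h⟩ := List.exists_cons_of_ne_nil (pvSplitC_ne_nil c rest)
          simp [pvSplitC, h]
        · have hpre : List.isPrefixOf [k] (c :: rest) = false := by
            simp [List.isPrefixOf]; exact fun h => (hc h.symm).elim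
          rw [show PySem.Chars.splitOn.go [k] (f+1) (c :: rest) cur acc =
              PySem.Chars.splitOn.go [k] f rest (c :: cur) acc by
            simp [PySem.Chars.splitOn.go, hpre]]
          rw [ih f (c :: cur) acc hrest]
          obtain ⟨t, ts, h⟩ := List.exists_cons_of_ne_nil (pvSplitC_ne_nil k rest)
          simp [pvSplitC, hc, h]

theorem pvSplitOn_single (k : Char) (l : List Char) :
    PySem.Chars.splitOn l [k] = pvSplitC k l := by
  rw [PySem.Chars.splitOn, pvGo_spec k l (l.length + 1) [] [] (by omega)]
  obtain ⟨t, ts, h⟩ := List.exists_cons_of_ne_nil (pvSplitC_ne_nil k l)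
  simp [h]

theorem pvRaw_single (k : Char) (l : List Char) :
    pvRaw [k] l = (pvSplitC k l).headI :: (pvSplitC k l).tail.map (fun e => k :: e) := by
  induction l with
  | nil => simp [pvRaw, pvSplitC]
  | cons c rest ih =>
      obtain ⟨t, ts, h⟩ := List.exists_cons_of_ne_nil (pvSplitC_ne_nil k rest)
      by_cases hc : c = k
      · subst hc; simp [pvRaw, pvSplitC, ih, h]
      · simp [pvRaw, pvSplitC, ih, h, hc]

theorem pvSwrp_eq (k : Char) (l : List Char) : pvSwrp l [k] = pvDrop (pvRaw [k] l) := by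
  rw [pvSwrp]
  simp only [pvSplitOn_single]
  obtain ⟨t, ts, h⟩ := List.exists_cons_of_ne_nil (pvSplitC_ne_nil k l)
  rw [pvRaw_single, h]
  cases ts with
  | nil =>
      simp only [h, List.length_cons, List.length_nil]
      norm_num [pvDrop]
      cases t <;> simp [pvDrop]
  | cons t1 ts' =>
      simp only [h, List.length_cons]
      rw [if_pos (by simp)]
      simp only [List.take, List.drop, List.map_cons, List.headI]
      cases t with
      | nil => simp [pvDrop]
      | cons a as => simp [pvDrop]

theorem pvRaw_cons (ks : List Char) (c : Char) (w : List Char) :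
    pvRaw ks (c :: w) = if c ∈ ks
      then [] :: (c :: (pvRaw ks w).headI) :: (pvRaw ks w).tail
      else (c :: (pvRaw ks w).headI) :: (pvRaw ks w).tail := by
  simp [pvRaw]

-- every non-first token of pvRaw is nonempty and begins with a cut char
theorem pvRaw_tail_mem (ks : List Char) (l : List Char) :
    ∀ t ∈ (pvRaw ks l).tail, t ≠ [] ∧ t.headI ∈ ks := by
  induction l with
  | nil => simp [pvRaw]
  | cons c rest ih =>
      obtain ⟨t0, ts, h⟩ := List.exists_cons_of_ne_nil (pvRaw_ne_nil ks rest)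
      intro t ht
      rw [pvRaw_cons, h] at ht
      by_cases hc : c ∈ ks
      · rw [if_pos hc] at ht
        simp only [List.tail_cons] at ht
        rcases List.mem_cons.mp ht with rfl | ht'
        · exact ⟨by simp, by simpa using hc⟩
        · exact ih t (by simp [h, ht'])
      · rw [if_neg hc] at ht
        simp only [List.tail_cons] at ht
        exact ih t (by simp [h, ht])

-- refinement: splitting at ks then further at k (k ∉ ks) = splitting at ks ++ [k]
theorem pvRaw_flatMap (k : Char) (ks : List Char) (hk : k ∉ ks) (l : List Char) :
    (pvRaw ks l).flatMap (pvRaw [k]) = pvRaw (ks ++ [k]) l := by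
  induction l with
  | nil => simp [pvRaw]
  | cons c rest ih =>
      obtain ⟨t, ts, h⟩ := List.exists_cons_of_ne_nil (pvRaw_ne_nil ks rest)
      obtain ⟨t1, ts1, h1⟩ := List.exists_cons_of_ne_nil (pvRaw_ne_nil [k] t)
      have hflat : pvRaw (ks ++ [k]) rest = t1 :: (ts1 ++ ts.flatMap (pvRaw [k])) := by
        rw [← ih, h]; simp [h1]
      by_cases hc : c ∈ ks
      · have hck : c ≠ k := fun e => hk (e ▸ hc)
        rw [pvRaw_cons, if_pos hc, h, pvRaw_cons, if_pos (by simp [hc]), hflat]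
        simp only [List.headI, List.tail_cons, List.flatMap_cons]
        rw [pvRaw_cons, if_neg (by simp [hck]), h1]
        simp [pvRaw]
      · by_cases hck : c = k
        · subst hck
          rw [pvRaw_cons, if_neg hc, h, pvRaw_cons, if_pos (by simp), hflat]
          simp only [List.headI, List.tail_cons, List.flatMap_cons]
          rw [pvRaw_cons, if_pos (by simp), h1]
          simp
        · rw [pvRaw_cons, if_neg hc, h, pvRaw_cons, if_neg (by simp [hc, hck]), hflat]
          simp only [List.headI, List.tail_cons, List.flatMap_cons]
          rw [pvRaw_cons, if_neg (by simp [hck]), h1]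
          simp

-- one pass of A's loop, applied to the dropped token list, drops correctly again
theorem pvStage (k : Char) (ks : List Char) (hk : k ∉ ks) (l : List Char) :
    (pvDrop (pvRaw ks l)).flatMap (fun t => pvDrop (pvRaw [k] t)) =
      pvDrop (pvRaw (ks ++ [k]) l) := by
  obtain ⟨t0, ts, h⟩ := List.exists_cons_of_ne_nil (pvRaw_ne_nil ks l)
  have htail : ∀ t ∈ ts, pvDrop (pvRaw [k] t) = pvRaw [k] t := by
    intro t ht
    have := pvRaw_tail_mem ks l t (by simp [h, ht])
    obtain ⟨c, w, rfl⟩ := List.exists_cons_of_ne_nil this.1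
    have hck : c ≠ k := fun e => hk (e ▸ (by simpa using this.2))
    rw [pvRaw_cons, if_neg (by simp [hck])]
    exact pvDrop_cons_cons c _ _
  have hRHS : pvRaw (ks ++ [k]) l = pvRaw [k] t0 ++ ts.flatMap (pvRaw [k]) := by
    rw [← pvRaw_flatMap k ks hk, h]; simp
  cases t0 with
  | cons a as =>
      rw [h, pvDrop_cons_cons, List.flatMap_cons, List.flatMap_congr htail]
      by_cases hak : a = k
      · have h2 : pvRaw [k] (a :: as) =
            [] :: (a :: (pvRaw [k] as).headI) :: (pvRaw [k] as).tail := by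
          rw [pvRaw_cons, if_pos (by simp [hak])]
        rw [hRHS, h2]
        simp [pvDrop_nil_cons, pvDrop_cons_cons]
      · have h2 : pvRaw [k] (a :: as) =
            (a :: (pvRaw [k] as).headI) :: (pvRaw [k] as).tail := by
          rw [pvRaw_cons, if_neg (by simp [hak])]
        rw [hRHS, h2]
        simp [pvDrop_cons_cons]
  | nil =>
      cases ts with
      | nil =>
          -- pvRaw ks l = [[]] forces l = []
          have hl : l = [] := by
            cases l with
            | nil => rfl
            | cons c w =>
                rw [pvRaw_cons] at h
                by_cases hc : c ∈ ks
                · rw [if_pos hc] at h; simp at h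
                · rw [if_neg hc] at h; simp at h
          subst hl
          simp [pvRaw, pvDrop]
      | cons t1 ts' =>
          rw [h, pvDrop_nil_cons, List.flatMap_congr htail]
          have hne : (t1 :: ts').flatMap (pvRaw [k]) ≠ [] := by
            simp only [List.flatMap_cons]
            obtain ⟨u, us, hu⟩ := List.exists_cons_of_ne_nil (pvRaw_ne_nil [k] t1)
            simp [hu]
          rw [hRHS]
          simp only [pvRaw]
          obtain ⟨u, us, hu⟩ := List.exists_cons_of_ne_nil hne
          rw [hu, List.singleton_append, pvDrop_nil_cons]

-- B's scan accumulates exactly the pvRaw tokens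
theorem pvScan_spec (ks : List Char) (l : List Char) :
    ∀ (res : List (List Char)) (cur : List Char),
      (l.foldl (pvScanStep ks) (res, cur)).1 ++ [(l.foldl (pvScanStep ks) (res, cur)).2] =
        res ++ (cur ++ (pvRaw ks l).headI) :: (pvRaw ks l).tail := by
  induction l with
  | nil => intro res cur; simp [pvRaw]
  | cons c rest ih =>
      intro res cur
      obtain ⟨t, ts, h⟩ := List.exists_cons_of_ne_nil (pvRaw_ne_nil ks rest)
      by_cases hc : c ∈ ks
      · rw [List.foldl_cons, show pvScanStep ks (res, cur) c = (res ++ [cur], [c]) by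
          simp [pvScanStep, hc]]
        rw [ih (res ++ [cur]) [c], pvRaw_cons, if_pos hc, h]
        simp
      · rw [List.foldl_cons, show pvScanStep ks (res, cur) c = (res, cur ++ [c]) by
          simp [pvScanStep, hc]]
        rw [ih res (cur ++ [c]), pvRaw_cons, if_neg hc, h]
        simp

-- the trailing if of port B is exactly pvDrop
theorem pvIf_eq_drop (toks : List (List Char)) :
    (if 1 < toks.length ∧ toks.headI = [] then toks.tail else toks) = pvDrop toks := by
  match toks with
  | [] => simp [pvDrop]
  | [x] => cases x <;> simp [pvDrop]
  | [] :: t :: ts => simp [pvDrop]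
  | (a :: as) :: t :: ts => simp [pvDrop]

theorem pvAlt_eq (part_of_url : String) :
    paramurl_split_alt part_of_url =
      (pvDrop (pvRaw ['?', '&', '=', '#'] part_of_url.toList)).map String.ofList := by
  rw [paramurl_split_alt]
  have h := pvScan_spec ['?', '&', '=', '#'] part_of_url.toList [] []
  simp only [List.nil_append] at h
  obtain ⟨t, ts, hr⟩ :=
    List.exists_cons_of_ne_nil (pvRaw_ne_nil ['?', '&', '=', '#'] part_of_url.toList)
  rw [hr] at h ⊢
  simp only [List.headI, List.tail_cons, List.nil_append] at h
  simp only [h, pvIf_eq_drop]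

-- ===== VERDICT (by name: the statement is the Claim_ definition above) =====
theorem paramurl_split_spec : Claim_equal_paramurl_split := by
  intro s _
  unfold Spec_paramurl_split
  rw [pvAlt_eq, paramurl_split]
  have step : ∀ (L : List (List Char)) (k : Char),
      L.foldl (fun temp elt => temp ++ pvSwrp elt [k]) [] =
        L.flatMap (fun t => pvDrop (pvRaw [k] t)) := by
    intro L k
    rw [PySem.List.foldl_append_eq_flatMap]
    simp only [List.nil_append]
    exact List.flatMap_congr (fun t _ => pvSwrp_eq k t)
  simp only [List.foldl_cons, List.foldl_nil, List.nil_append]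
  rw [pvSwrp_eq]
  rw [step (pvDrop (pvRaw ['?'] s.toList)) '&', pvStage '&' ['?'] (by decide) s.toList]
  simp only [List.cons_append, List.nil_append]
  rw [step (pvDrop (pvRaw ['?', '&'] s.toList)) '=', pvStage '=' ['?', '&'] (by decide) s.toList]
  simp only [List.cons_append, List.nil_append]
  rw [step (pvDrop (pvRaw ['?', '&', '='] s.toList)) '#',
    pvStage '#' ['?', '&', '='] (by decide) s.toList]
  simp only [List.cons_append, List.nil_append]
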